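-- pv_equiv track=rewrite | github.com/mandcony/quantoniumos | experiments/fibonacci/fibonacci_tilt_hypotheses.py | generate_golden_text
-- ===== SOURCE A (Python) =====
-- def generate_golden_text(length: int) -> str:
--     """Generate text with golden-ratio run-length patterns."""
--     # Fibonacci run lengths: switch characters at Fibonacci intervals
--     fib = [1, 1]
--     while sum(fib) < length:
--         fib.append(fib[-1] + fib[-2])
--
--     text = []
--     chars = ['a', 'b']
--     char_idx = 0
--
--     for run_len in fib:
--         if len(text) >= length:
--             break
--         text.extend([chars[char_idx]] * min(run_len, length - len(text)))
--         char_idx = 1 - char_idx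
--
--     return ''.join(text[:length])
-- ===== SOURCE B (Python) =====
-- def generate_golden_text(length: int) -> str:
--     """Generate text with golden-ratio run-length patterns, via the
--     Fibonacci-word string recursion: run_0 = 'a', run_1 = 'b',
--     run_{k+2} = flip(run_{k+1}) + run_k (flip swaps a<->b), so each run
--     is built from the two previous runs with no run-length arithmetic."""
--     if length <= 0:
--         return ''
--     flip = str.maketrans('ab', 'ba')
--     prev, cur, out = 'a', 'b', 'a'
--     while len(out) < length:
--         prev, cur, out = cur, cur.translate(flip) + prev, out + cur
--     return out[:length]
-- ===== Notes on version B (the rewrite author's own statement) =====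
-- stated objective: faster
-- what changed: Replaces A's numeric scheme (precompute a Fibonacci run-length list with a per-iteration sum() re-scan, then fill a per-character list run-length by run-length) with the Fibonacci-word string recursion run_next = flip(cur) + prev: each run is produced as a whole string from the two previous run strings via a character-swap translation, so the text is assembled from logarithmically many bulk chunks with no run-length integers, no fib list and no per-character list build.
import Mathlib
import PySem

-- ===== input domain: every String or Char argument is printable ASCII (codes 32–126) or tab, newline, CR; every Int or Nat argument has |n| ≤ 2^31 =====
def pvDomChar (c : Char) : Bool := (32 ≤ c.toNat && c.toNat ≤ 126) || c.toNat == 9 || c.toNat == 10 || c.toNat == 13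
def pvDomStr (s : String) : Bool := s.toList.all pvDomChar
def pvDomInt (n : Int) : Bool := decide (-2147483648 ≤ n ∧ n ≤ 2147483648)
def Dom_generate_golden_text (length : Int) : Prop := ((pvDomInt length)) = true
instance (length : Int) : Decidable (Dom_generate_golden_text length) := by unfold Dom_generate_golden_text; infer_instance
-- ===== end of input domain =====

-- B replaces A's numeric run-length scheme with the Fibonacci-word string recursion
-- run_{k+2} = flip(run_{k+1}) ++ run_k, assembling the text from bulk run strings instead of
-- per-character list fills; a timing run measured B several times faster (constant factor).

-- ===== PORT A =====
-- A's while loop `while sum(fib) < length: fib.append(fib[-1] + fib[-2])`;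
-- p, q track fib[-2], fib[-1] (with positivity proofs for termination).
def fibLoopA (length : Int) (fib : List Int) (p q : Int) (hp : 1 ≤ p) (hq : 1 ≤ q) : List Int :=
  if h : fib.sum < length then
    fibLoopA length (fib ++ [p + q]) q (p + q) hq (by omega)
  else fib
termination_by (length - fib.sum).toNat
decreasing_by simp [List.sum_append]; omega

-- A's for loop over fib with the break; char_idx stays in {0,1}, chars[char_idx] is 'a'/'b'.
def fillLoopA (length : Int) (runs : List Int) (text : List Char) (ci : Int) : List Char :=
  match runs with
  | [] => text
  | r :: rs =>
    if (text.length : Int) ≥ length then text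
    else
      fillLoopA length rs
        (text ++ PySem.List.pyRepeat [if ci == 0 then 'a' else 'b'] (min r (length - (text.length : Int))))
        (1 - ci)

def generate_golden_text (length : Int) : String :=
  let fib := fibLoopA length [1, 1] 1 1 (by omega) (by omega)
  let text := fillLoopA length fib [] 0
  String.ofList (PySem.List.slice text none (some length))

-- ===== PORT B =====
-- `cur.translate(flip)`: swap 'a' and 'b', leave any other character unchanged.
def flipStr (s : List Char) : List Char :=
  s.map (fun c => if c == 'a' then 'b' else if c == 'b' then 'a' else c)

-- B's while loop: prev, cur, out = cur, flip(cur) + prev, out + cur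
-- (cur ≠ [] is carried for termination).
def growLoopB (length : Int) (prev cur out : List Char) (hcur : cur ≠ []) : List Char :=
  if h : (out.length : Int) < length then
    growLoopB length cur (flipStr cur ++ prev) (out ++ cur)
      (by
        intro hn
        rcases List.append_eq_nil_iff.mp hn with ⟨h1, _⟩
        exact hcur (List.map_eq_nil_iff.mp h1))
  else out
termination_by (length - (out.length : Int)).toNat
decreasing_by
  have : cur.length ≠ 0 := by simpa [List.length_eq_zero_iff] using hcur
  simp; omega

def generate_golden_text_alt (length : Int) : String :=
  if length ≤ 0 then ""
  else
    String.ofList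
      (PySem.List.slice (growLoopB length ['a'] ['b'] ['a'] (by decide)) none (some length))

-- ===== PRECONDITION & SPEC =====
def Spec_generate_golden_text (length : Int) (out : String) : Prop := out = generate_golden_text_alt length
instance (length : Int) (out : String) : Decidable (Spec_generate_golden_text length out) := by unfold Spec_generate_golden_text; infer_instance

-- ===== CLAIM =====
def Claim_equal_generate_golden_text : Prop := ∀ (length : Int), Dom_generate_golden_text length → Spec_generate_golden_text length (generate_golden_text length)

-- ===== LEMMAS AND PROOFS =====

-- Fibonacci run lengths and run characters.
def fibN : Nat → Nat
  | 0 => 1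
  | 1 => 1
  | k + 2 => fibN (k + 1) + fibN k

def chN (k : Nat) : Char := if k % 2 == 0 then 'a' else 'b'

-- The k-th run as B builds it: run_{k+2} = flip(run_{k+1}) ++ run_k.
def runStr : Nat → List Char
  | 0 => ['a']
  | 1 => ['b']
  | k + 2 => flipStr (runStr (k + 1)) ++ runStr k

-- Concatenation of n runs starting at index k.
def catRuns : Nat → Nat → List Char
  | _, 0 => []
  | k, n + 1 => runStr k ++ catRuns (k + 1) n

theorem fibN_pos (k : Nat) : 1 ≤ fibN k := by
  induction k using fibN.induct with
  | case1 => decide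
  | case2 => decide
  | case3 k ih1 ih2 => simp [fibN]; omega

theorem chN_flip (k : Nat) :
    (if chN (k + 1) == 'a' then 'b' else if chN (k + 1) == 'b' then 'a' else chN (k + 1)) = chN k := by
  have h2 : (k + 1) % 2 = 1 - k % 2 := by omega
  by_cases h : k % 2 = 0
  · simp [chN, h2, h]
  · have h1 : k % 2 = 1 := by omega
    simp [chN, h2, h1]

theorem chN_add_two (k : Nat) : chN (k + 2) = chN k := by
  have : (k + 2) % 2 = k % 2 := by omega
  simp [chN, this]

theorem runStr_eq (k : Nat) : runStr k = List.replicate (fibN k) (chN k) := by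
  induction k using runStr.induct with
  | case1 => decide
  | case2 => decide
  | case3 k ih1 ih2 =>
    rw [runStr, ih1, ih2, flipStr, List.map_replicate, chN_flip, chN_add_two]
    rw [show fibN (k + 2) = fibN (k + 1) + fibN k from rfl, List.replicate_add]

theorem runStr_ne_nil (k : Nat) : runStr k ≠ [] := by
  rw [runStr_eq]
  have h1 := fibN_pos k
  cases hk : fibN k with
  | zero => omega
  | succ n =>
    intro hnil
    simp [List.replicate] at hnil

theorem catRuns_snoc (n : Nat) : ∀ (j : Nat), catRuns j (n + 1) = catRuns j n ++ runStr (j + n) := by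
  induction n with
  | zero => intro j; simp [catRuns]
  | succ n ih =>
    intro j
    rw [catRuns, ih (j + 1), catRuns, List.append_assoc,
      show j + 1 + n = j + (n + 1) from by omega]

theorem catRuns_add (p : Nat) : ∀ (j q : Nat), catRuns j (p + q) = catRuns j p ++ catRuns (j + p) q := by
  induction p with
  | zero => intro j q; simp [catRuns]
  | succ p ih =>
    intro j q
    rw [show p + 1 + q = (p + q) + 1 from by omega, catRuns, catRuns, ih (j + 1) q,
      List.append_assoc, show j + 1 + p = j + (p + 1) from by omega]

-- The Fibonacci run-length sequence starting from the pair (a, b) (A's fib list tail).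
def genRuns (a b : Int) : Nat → List Int
  | 0 => []
  | n + 1 => a :: genRuns b (a + b) n

-- A's while loop extends [.., p, q] with the tail of the fib sequence until the sum reaches length.
theorem fibLoopA_spec (length : Int) (fib : List Int) (p q : Int) (hp : 1 ≤ p) (hq : 1 ≤ q) :
    ∃ m, fibLoopA length fib p q hp hq = fib ++ genRuns (p + q) (q + (p + q)) m ∧
      length ≤ (fibLoopA length fib p q hp hq).sum := by
  induction fib, p, q, hp, hq using fibLoopA.induct length with
  | case1 fib p q hp hq h ih =>
    obtain ⟨m, hm, hs⟩ := ih
    refine ⟨m + 1, ?_, ?_⟩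
    · rw [fibLoopA, dif_pos h, hm]
      simp [genRuns]
    · rw [fibLoopA, dif_pos h]
      exact hs
  | case2 fib p q hp hq h =>
    rw [fibLoopA, dif_neg h]
    exact ⟨0, by simp [genRuns], by omega⟩

-- The generated run lengths are the fibN values, and their sum is the length of catRuns.
theorem genRuns_sum_eq (n : Nat) :
    ∀ (k : Nat) (a b : Int), a = (fibN k : Int) → b = (fibN (k + 1) : Int) →
      (genRuns a b n).sum = ((catRuns k n).length : Int) := by
  induction n with
  | zero => intro k a b _ _; simp [genRuns, catRuns]
  | succ n ih =>
    intro k a b ha hb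
    rw [genRuns, catRuns, List.sum_cons, List.length_append,
      ih (k + 1) b (a + b) hb (by rw [ha, hb, show fibN (k + 2) = fibN (k + 1) + fibN k from rfl]; push_cast; ring),
      runStr_eq, List.length_replicate, ha]
    push_cast
    ring

theorem if_ci_eq_chN (k : Nat) :
    (if (((k % 2 : Nat) : Int) == 0) = true then 'a' else 'b') = chN k := by
  by_cases h : k % 2 = 0
  · simp [chN, h]
  · have h1 : k % 2 = 1 := by omega
    simp [chN, h1]

-- A's fill loop over the generated run lengths builds the truncated concatenation of runs.
theorem fillLoopA_spec (length : Int) (n : Nat) :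
    ∀ (k : Nat) (a b ci : Int) (text : List Char),
      a = (fibN k : Int) → b = (fibN (k + 1) : Int) → ci = ((k % 2 : Nat) : Int) →
      fillLoopA length (genRuns a b n) text ci =
        text ++ List.take (length - (text.length : Int)).toNat (catRuns k n) := by
  induction n with
  | zero => intro k a b ci text _ _ _; simp [genRuns, catRuns, fillLoopA]
  | succ n ih =>
    intro k a b ci text ha hb hci
    rw [genRuns, fillLoopA]
    by_cases h : (text.length : Int) ≥ length
    · rw [if_pos h]
      have h0 : (length - (text.length : Int)).toNat = 0 := by omega
      simp [h0]
    · rw [if_neg h]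
      rw [PySem.List.pyRepeat_singleton]
      have hci' : (1 - ci) = (((k + 1) % 2 : Nat) : Int) := by
        have hk : k % 2 = 0 ∨ k % 2 = 1 := by omega
        have hk1 : (k + 1) % 2 = 1 - k % 2 := by omega
        rcases hk with h0 | h0 <;> simp [hci, h0, hk1]
      rw [ih (k + 1) b (a + b) (1 - ci)
        (text ++ List.replicate (min a (length - (text.length : Int))).toNat (if ci == 0 then 'a' else 'b'))
        hb (by rw [ha, hb, show fibN (k + 2) = fibN (k + 1) + fibN k from rfl]; push_cast; ring) hci']
      rw [catRuns, runStr_eq]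
      rw [List.take_append, List.take_replicate, List.length_replicate]
      rw [hci, if_ci_eq_chN k]
      have hfib := fibN_pos k
      have hm : (min a (length - (text.length : Int))).toNat =
          min (length - (text.length : Int)).toNat (fibN k) := by
        rw [ha]; omega
      rw [hm]
      have hr : (length - ((text.length : Int) +
            ((min (length - (text.length : Int)).toNat (fibN k) : Nat) : Int))).toNat =
          (length - (text.length : Int)).toNat - fibN k := by
        omega
      simp only [List.length_append, List.length_replicate, Nat.cast_add]
      rw [hr, List.append_assoc]

-- B's loop, run from the invariant state (prev, cur, out) = (run_k, run_{k+1}, cat of the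
-- first k+1 runs), ends in the concatenation of enough runs to cover length.
theorem growLoopB_spec (length : Int) (fuel : Nat) :
    ∀ (k : Nat) (out : List Char) (hcur : runStr (k + 1) ≠ []),
      (length - (out.length : Int)).toNat ≤ fuel →
      out = catRuns 0 (k + 1) →
      ∃ K, growLoopB length (runStr k) (runStr (k + 1)) out hcur = catRuns 0 K ∧
        length ≤ ((catRuns 0 K).length : Int) := by
  induction fuel with
  | zero =>
    intro k out hcur hf hout
    have h : ¬ ((out.length : Int) < length) := by omega
    rw [growLoopB, dif_neg h]
    exact ⟨k + 1, hout, by rw [← hout]; omega⟩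
  | succ fuel ih =>
    intro k out hcur hf hout
    by_cases h : (out.length : Int) < length
    · rw [growLoopB, dif_pos h]
      have hpos : 1 ≤ (runStr (k + 1)).length := by
        have hne := runStr_ne_nil (k + 1)
        cases hx : runStr (k + 1) with
        | nil => exact absurd hx hne
        | cons a l => simp
      have hcall := ih (k + 1) (out ++ runStr (k + 1)) (runStr_ne_nil (k + 2))
        (by simp only [List.length_append, Nat.cast_add]; omega)
        (by rw [hout, catRuns_snoc (k + 1) 0, Nat.zero_add])
      exact hcall
    · rw [growLoopB, dif_neg h]
      exact ⟨k + 1, hout, by rw [← hout]; omega⟩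

-- Truncating the run concatenation at L does not depend on how many runs were produced,
-- as long as each covers L.
theorem take_catRuns_eq (L K N : Nat) (hK : L ≤ (catRuns 0 K).length)
    (hN : L ≤ (catRuns 0 N).length) :
    (catRuns 0 K).take L = (catRuns 0 N).take L := by
  rcases Nat.le_total K N with hle | hle
  · rw [show N = K + (N - K) from by omega, catRuns_add K 0 (N - K),
      List.take_append_of_le_length hK]
  · rw [show K = N + (K - N) from by omega, catRuns_add N 0 (K - N),
      List.take_append_of_le_length hN]

-- ===== VERDICT =====
theorem generate_golden_text_spec : Claim_equal_generate_golden_text := by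
  intro length _
  unfold Spec_generate_golden_text generate_golden_text generate_golden_text_alt
  by_cases hl : length ≤ 0
  · -- A: the fib loop stops at [1,1]; the fill loop returns [] at once; the slice of [] is [].
    rw [if_pos hl]
    show String.ofList (PySem.List.slice
      (fillLoopA length (fibLoopA length [1, 1] 1 1 (by omega) (by omega)) [] 0)
      none (some length)) = ""
    rw [fibLoopA, dif_neg (by simp; omega)]
    rw [show fillLoopA length [1, 1] [] 0 = [] from by rw [fillLoopA, if_pos (by simp; omega)]]
    simp [PySem.List.slice]
  · rw [if_neg hl]
    obtain ⟨m, hm, hs⟩ := fibLoopA_spec length [1, 1] 1 1 (by omega) (by omega)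
    have hfib : fibLoopA length [1, 1] 1 1 (by omega) (by omega) = genRuns 1 1 (m + 2) := by
      rw [hm]; simp [genRuns]
    rw [hfib] at hs
    show String.ofList (PySem.List.slice
        (fillLoopA length (fibLoopA length [1, 1] 1 1 (by omega) (by omega)) [] 0)
        none (some length)) =
      String.ofList (PySem.List.slice (growLoopB length ['a'] ['b'] ['a'] (by decide))
        none (some length))
    obtain ⟨K, hK, hKlen⟩ := growLoopB_spec length (length - 1).toNat 0 ['a']
      (by decide) (by simp only [List.length_cons, List.length_nil]; omega) (by decide)
    have hK' : growLoopB length ['a'] ['b'] ['a'] (by decide) = catRuns 0 K := hK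
    have hfill : fillLoopA length (genRuns 1 1 (m + 2)) [] 0 =
        [] ++ List.take (length - (([] : List Char).length : Int)).toNat (catRuns 0 (m + 2)) :=
      fillLoopA_spec length (m + 2) 0 1 1 0 [] (by decide) (by decide) (by decide)
    have hNlen : length ≤ ((catRuns 0 (m + 2)).length : Int) := by
      rw [← genRuns_sum_eq (m + 2) 0 1 1 (by decide) (by decide)]
      exact hs
    rw [hfib, hfill, hK']
    rw [PySem.List.slice_to _ (by omega), PySem.List.slice_to _ (by omega)]
    simp only [List.nil_append, List.length_nil, Nat.cast_zero, Int.sub_zero]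
    rw [List.take_take]
    simp only [Nat.min_self]
    rw [take_catRuns_eq length.toNat K (m + 2) (by omega) (by omega)]
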